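-- pv_equiv track=rewrite | github.com/Asvitha-Vibeeshanan/Leetcode | 2226-rings-and-rods/rings-and-rods.py | countPoints
-- ===== SOURCE A (Python) =====
-- def countPoints(rings: str) -> int:
--     # dict1 = {}
--     # for i in range(1, len(rings), 2):
--     #     rod = rings[i]
--     #     color = rings[i-1]
--     #     if rod not in dict1:
--     #         dict1[rod] = set()
--     #     dict1[rod].add(color)
--
--     # count = 0
--     # for colors in dict1.values():
--     #     if {"B", "G", "R"}.issubset(colors):
--     #         count += 1
--
--     # return count
--
--     dict1 = {}
--     rings = list(rings)
--     for i in range(1,len(rings),2):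
--         if rings[i] not in dict1:
--             dict1[rings[i]] = {rings[i-1]}
--         else:
--             dict1[rings[i]].add(rings[i-1])
--     count = 0
--     for colors in dict1.values():
--         if {"B", "G", "R"}.issubset(colors):
--             count += 1
--
--     return count
-- ===== SOURCE B (Python) =====
-- def countPoints(rings: str) -> int:
--     # Sort the (rod, color) pairs by rod, then count complete groups in one scan.
--     pairs = sorted(((rings[i], rings[i - 1]) for i in range(1, len(rings), 2)),
--                    key=lambda p: p[0])
--     count = 0
--     k = 0
--     n = len(pairs)
--     while k < n:
--         rod = pairs[k][0]
--         seen = []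
--         while k < n and pairs[k][0] == rod:
--             seen.append(pairs[k][1])
--             k += 1
--         if 'B' in seen and 'G' in seen and 'R' in seen:
--             count += 1
--     return count
-- ===== Notes on version B (the rewrite author's own statement) =====
-- stated objective: alternative
-- what changed: Replaces A's hash-grouping (dict of per-rod color sets plus a subset check over dict values) with sort-then-scan: the (rod, color) pairs are sorted by rod and one linear sweep over the sorted list counts the runs that contain all of B, G and R.
import Mathlib
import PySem

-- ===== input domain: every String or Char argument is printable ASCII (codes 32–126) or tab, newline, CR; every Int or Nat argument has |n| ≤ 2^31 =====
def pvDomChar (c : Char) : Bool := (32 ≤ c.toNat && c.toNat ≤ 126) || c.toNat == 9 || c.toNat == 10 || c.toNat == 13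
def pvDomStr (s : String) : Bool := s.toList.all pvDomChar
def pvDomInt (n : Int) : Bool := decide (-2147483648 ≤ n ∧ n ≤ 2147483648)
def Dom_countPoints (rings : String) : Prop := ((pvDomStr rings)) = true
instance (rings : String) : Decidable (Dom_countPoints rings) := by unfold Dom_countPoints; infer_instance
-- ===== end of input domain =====

-- B replaces A's hash-grouping (dict of per-rod color sets + subset test) by sort-then-scan:
-- sort the (rod, color) pairs by rod and count, in one sweep, the runs containing B, G and R.
-- Return value only (A rebinds its parameter locally; no observable mutation).

-- ===== PORT A =====
-- indices produced by range(1, len, 2) are always in range, so pyGetD's default ' ' is never read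
def countPoints (rings : String) : Int :=
  let l := rings.toList
  let d := (PySem.List.pyRange 1 (l.length : Int) 2).foldl
    (fun d i =>
      if !(d.contains (PySem.List.pyGetD l i ' ')) then
        d.insert (PySem.List.pyGetD l i ' ') (PySem.Set.ofList [PySem.List.pyGetD l (i-1) ' '])
      else
        d.insert (PySem.List.pyGetD l i ' ')
          (PySem.Set.add (d.getD (PySem.List.pyGetD l i ' ') PySem.Set.empty)
            (PySem.List.pyGetD l (i-1) ' ')))
    PySem.Dict.empty
  d.values.foldl
    (fun count colors =>
      if (PySem.Set.ofList ['B', 'G', 'R']).issubset colors then count + 1 else count) 0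

-- ===== PORT B =====
-- the outer/inner while loops of Source B: each step consumes one run of equal rods
def pvScan : List (Char × Char) → Int
  | [] => 0
  | (rod, c) :: t =>
    let seen := c :: (t.takeWhile (fun p => p.1 == rod)).map Prod.snd
    (if seen.contains 'B' && seen.contains 'G' && seen.contains 'R' then 1 else 0)
      + pvScan (t.dropWhile (fun p => p.1 == rod))
termination_by l => l.length
decreasing_by
  simp only [List.length_cons]
  exact Nat.lt_succ_of_le (List.length_dropWhile_le _ _)

def countPoints_alt (rings : String) : Int :=
  let l := rings.toList
  let pairs := (PySem.List.pyRange 1 (l.length : Int) 2).map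
    (fun i => (PySem.List.pyGetD l i ' ', PySem.List.pyGetD l (i - 1) ' '))
  pvScan (PySem.List.sorted pairs Prod.fst false)

-- ===== PRECONDITION & SPEC =====
def Spec_countPoints (rings : String) (out : Int) : Prop := out = countPoints_alt rings
instance (rings : String) (out : Int) : Decidable (Spec_countPoints rings out) := by unfold Spec_countPoints; infer_instance

-- ===== CLAIM (what is proved, stated in full; the proofs are below) =====
def Claim_equal_countPoints : Prop := ∀ (rings : String), Dom_countPoints rings → Spec_countPoints rings (countPoints rings)

-- ===== LEMMAS AND PROOFS =====

-- the (color, rod) pairs A's index loop visits (rings[i-1], rings[i]) for odd i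
def pvPairsOf : List Char → List (Char × Char)
  | c :: r :: t => (c, r) :: pvPairsOf t
  | _ => []

-- common value both programs compute: distinct rods whose color set contains B, G and R
def pvCanon (P : List (Char × Char)) : Int :=
  ((PySem.Set.ofList (P.map Prod.snd)).countP
    (fun r => decide (('B', r) ∈ P) && decide (('G', r) ∈ P) && decide (('R', r) ∈ P)) : Int)

-- A's dict-building step, value-level (the else branch mutates the stored set in place)
def pvStepD (d : PySem.Dict Char (PySem.Set Char)) (c r : Char) :
    PySem.Dict Char (PySem.Set Char) :=
  if !(d.contains r) then d.insert r (PySem.Set.ofList [c])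
  else d.insert r (PySem.Set.add (d.getD r PySem.Set.empty) c)

lemma pvRange_odd (n : Nat) :
    PySem.List.pyRange 1 (n : Int) 2
      = (List.range (n / 2)).map (fun k => ((2 * k + 1 : Nat) : Int)) := by
  rw [PySem.List.pyRange_of_pos 1 (n : Int) (by norm_num)]
  have hcnt : (if (1 : Int) < (n : Int) then (((n : Int) - 1 + 2 - 1) / 2).toNat else 0)
      = n / 2 := by
    split_ifs with h
    · have h1 : ((n : Int) - 1 + 2 - 1) = (n : Int) := by ring
      rw [h1]
      omega
    · omega
  rw [hcnt]
  exact List.map_congr_left (fun k _ => by push_cast; ring)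

lemma pvFold_nat_pairs {α : Type} (f : α → Char → Char → α) :
    ∀ (l : List Char) (init : α),
      (List.range (l.length / 2)).foldl
          (fun a k => f a (l.getD (2 * k) ' ') (l.getD (2 * k + 1) ' ')) init
        = (pvPairsOf l).foldl (fun a p => f a p.1 p.2) init := by
  intro l
  induction l using pvPairsOf.induct with
  | case1 c r t ih =>
    intro init
    have hlen : (c :: r :: t).length / 2 = t.length / 2 + 1 := by simp; omega
    rw [hlen, List.range_succ_eq_map, List.foldl_cons, List.foldl_map]
    have hfun : (fun (a : α) (k : Nat) =>
        f a ((c :: r :: t).getD (2 * k.succ) ' ') ((c :: r :: t).getD (2 * k.succ + 1) ' '))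
        = fun (a : α) (k : Nat) => f a (t.getD (2 * k) ' ') (t.getD (2 * k + 1) ' ') := by
      funext a k
      rw [show 2 * k.succ = (2 * k + 1) + 1 by omega, show ((2 * k + 1) + 1) + 1 = (2 * k + 1 + 1) + 1 by omega]
      simp
    rw [hfun, ih, pvPairsOf]
    simp
  | case2 l h =>
    intro init
    match l, h with
    | [], _ => simp [pvPairsOf]
    | [c], _ => simp [pvPairsOf]
    | c :: r :: t, h => exact absurd rfl (h c r t)

lemma pvFold_range_pairs {α : Type} (f : α → Char → Char → α) (l : List Char) (init : α) :
    (PySem.List.pyRange 1 (l.length : Int) 2).foldl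
        (fun a i => f a (PySem.List.pyGetD l (i - 1) ' ') (PySem.List.pyGetD l i ' ')) init
      = (pvPairsOf l).foldl (fun a p => f a p.1 p.2) init := by
  rw [pvRange_odd l.length, List.foldl_map]
  have hfun : (fun (a : α) (k : Nat) =>
      f a (PySem.List.pyGetD l (((2 * k + 1 : Nat) : Int) - 1) ' ')
        (PySem.List.pyGetD l ((2 * k + 1 : Nat) : Int) ' '))
      = fun (a : α) (k : Nat) => f a (l.getD (2 * k) ' ') (l.getD (2 * k + 1) ' ') := by
    funext a k
    rw [show ((2 * k + 1 : Nat) : Int) - 1 = ((2 * k : Nat) : Int) by push_cast; ring]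
    rw [PySem.List.pyGetD_natCast, PySem.List.pyGetD_natCast]
  rw [hfun]
  exact pvFold_nat_pairs f l init

lemma pvDict_items (P : List (Char × Char)) :
    (P.foldl (fun d p => pvStepD d p.1 p.2) PySem.Dict.empty).items
      = (PySem.Set.ofList (P.map Prod.snd)).map
          (fun r => (r, PySem.Set.ofList ((P.filter (fun p => p.2 == r)).map Prod.fst))) := by
  induction P using List.reverseRecOn with
  | nil => rfl
  | append_singleton P x ih =>
    obtain ⟨c, r⟩ := x
    rw [List.foldl_append, List.foldl_cons, List.foldl_nil]
    set D := P.foldl (fun d p => pvStepD d p.1 p.2) PySem.Dict.empty with hD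
    have hkeys : D.keys = PySem.Set.ofList (P.map Prod.snd) := by
      simp only [PySem.Dict.keys, ih, List.map_map]
      exact List.map_id'' (fun x => rfl) _
    have hnodup : D.keys.Nodup := by rw [hkeys]; exact PySem.Set.nodup_ofList _
    have hcontains : D.contains r = true ↔ r ∈ P.map Prod.snd := by
      rw [PySem.Dict.contains_iff_mem_keys, hkeys, PySem.Set.mem_ofList]
    have hmapS : (P ++ [(c, r)]).map Prod.snd = P.map Prod.snd ++ [r] := by simp
    by_cases hr : r ∈ P.map Prod.snd
    · -- the rod is already a key: the else branch updates its color set in place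
      have hc : D.contains r = true := hcontains.mpr hr
      have hmemS : r ∈ PySem.Set.ofList (P.map Prod.snd) := (PySem.Set.mem_ofList _ _).mpr hr
      have hmem_items :
          (r, PySem.Set.ofList ((P.filter (fun p => p.2 == r)).map Prod.fst)) ∈ D.items := by
        rw [ih]; exact List.mem_map.mpr ⟨r, hmemS, rfl⟩
      have hold : D.getD r PySem.Set.empty
          = PySem.Set.ofList ((P.filter (fun p => p.2 == r)).map Prod.fst) :=
        PySem.Dict.getD_of_mem_items _ hmem_items hnodup _
      have hS : PySem.Set.ofList ((P ++ [(c, r)]).map Prod.snd)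
          = PySem.Set.ofList (P.map Prod.snd) := by
        rw [hmapS, PySem.Set.ofList_append_singleton, PySem.Set.add_of_mem hmemS]
      simp only [pvStepD, hc, Bool.not_true, Bool.false_eq_true, if_false]
      rw [PySem.Dict.items_insert_of_contains _ _ hc, ih, List.map_map, hS]
      apply List.map_congr_left
      intro r' hr'
      by_cases he : r' = r
      · subst he
        simp only [Function.comp_apply, beq_self_eq_true, if_true]
        rw [hold, ← PySem.Set.ofList_append_singleton]
        simp [List.filter_append]
      · simp only [Function.comp_apply]
        rw [if_neg (by simpa using he)]
        have : ((P ++ [(c, r)]).filter (fun p => p.2 == r')) = P.filter (fun p => p.2 == r') := by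
          simp [List.filter_append, Ne.symm he]
        rw [this]
    · -- a new rod: the then branch appends a fresh singleton color set
      have hc : D.contains r = false := by
        rw [Bool.eq_false_iff, Ne, hcontains]; exact hr
      have hnotmemS : r ∉ PySem.Set.ofList (P.map Prod.snd) := fun h =>
        hr ((PySem.Set.mem_ofList _ _).mp h)
      have hS : PySem.Set.ofList ((P ++ [(c, r)]).map Prod.snd)
          = PySem.Set.ofList (P.map Prod.snd) ++ [r] := by
        rw [hmapS, PySem.Set.ofList_append_singleton, PySem.Set.add_of_not_mem hnotmemS]
      simp only [pvStepD, hc, Bool.not_false, if_true]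
      rw [PySem.Dict.items_insert_of_not_contains _ _ hc, ih, hS, List.map_append]
      congr 1
      · apply List.map_congr_left
        intro r' hr'
        have he : r' ≠ r := fun h => hnotmemS (h ▸ hr')
        have : ((P ++ [(c, r)]).filter (fun p => p.2 == r')) = P.filter (fun p => p.2 == r') := by
          simp [List.filter_append, Ne.symm he]
        rw [this]
      · have hfil : P.filter (fun p => p.2 == r) = [] := by
          rw [List.filter_eq_nil_iff]
          rintro ⟨c', r'⟩ hp hbe
          exact hr (List.mem_map.mpr ⟨(c', r'), hp, by simpa using hbe⟩)
        simp [List.filter_append, hfil]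

lemma pvColors_mem (P : List (Char × Char)) (r c : Char) :
    c ∈ (P.filter (fun p => p.2 == r)).map Prod.fst ↔ (c, r) ∈ P := by
  simp only [List.mem_map, List.mem_filter, beq_iff_eq]
  constructor
  · rintro ⟨⟨c', r'⟩, ⟨hp, he⟩, rfl⟩
    simp only at he
    subst he
    exact hp
  · intro h
    exact ⟨(c, r), ⟨h, rfl⟩, rfl⟩

lemma pvPred_eq (P : List (Char × Char)) (r : Char) :
    (PySem.Set.ofList ['B', 'G', 'R']).issubset
        (PySem.Set.ofList ((P.filter (fun p => p.2 == r)).map Prod.fst))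
      = (decide (('B', r) ∈ P) && decide (('G', r) ∈ P) && decide (('R', r) ∈ P)) := by
  rw [Bool.eq_iff_iff]
  simp only [PySem.Set.issubset_iff, PySem.Set.mem_ofList, Bool.and_eq_true,
    decide_eq_true_eq, pvColors_mem, List.forall_mem_cons]
  tauto

-- A computes pvCanon of its (color, rod) pair list
lemma pvA_canon (rings : String) : countPoints rings = pvCanon (pvPairsOf rings.toList) := by
  have h1 : countPoints rings
      = ((pvPairsOf rings.toList).foldl (fun d p => pvStepD d p.1 p.2)
            PySem.Dict.empty).values.foldl
          (fun count colors =>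
            if (PySem.Set.ofList ['B', 'G', 'R']).issubset colors then count + 1 else count)
          0 := by
    rw [← pvFold_range_pairs pvStepD rings.toList PySem.Dict.empty]
    rfl
  rw [h1]
  simp only [PySem.Dict.values, pvDict_items, List.map_map]
  rw [PySem.List.foldl_if_add_one, List.countP_map, zero_add, pvCanon]
  congr 2
  funext r
  simp only [Function.comp_apply]
  rw [pvPred_eq]

-- B's pair list is A's with the components swapped
lemma pvPairs_map (l : List Char) :
    (PySem.List.pyRange 1 (l.length : Int) 2).map
        (fun i => (PySem.List.pyGetD l i ' ', PySem.List.pyGetD l (i - 1) ' '))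
      = (pvPairsOf l).map (fun p => (p.2, p.1)) := by
  have h := pvFold_range_pairs
    (fun (a : List (Char × Char)) c r => a ++ [(r, c)]) l []
  simpa only [PySem.List.foldl_append_singleton_eq_map, List.nil_append] using h

-- the run scan of a list sorted by rod counts the distinct complete rods
lemma pvScan_sorted : ∀ (L : List (Char × Char)), L.Pairwise (fun a b => a.1 ≤ b.1) →
    pvScan L = ((PySem.Set.ofList (L.map Prod.fst)).countP
      (fun r => decide ((r, 'B') ∈ L) && decide ((r, 'G') ∈ L) && decide ((r, 'R') ∈ L)) : Int) := by
  intro L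
  induction L using pvScan.induct with
  | case1 => intro _; simp [pvScan, PySem.Set.ofList]
  | case2 rod c t ih =>
    intro hpw
    have h0 : ∀ y ∈ t, rod ≤ y.1 := by
      intro y hy; exact (List.pairwise_cons.mp hpw).1 y hy
    have ht : t.Pairwise (fun a b : Char × Char => a.1 ≤ b.1) := (List.pairwise_cons.mp hpw).2
    have hrestpw : (t.dropWhile (fun p => p.1 == rod)).Pairwise
        (fun a b : Char × Char => a.1 ≤ b.1) :=
      List.Pairwise.sublist (List.dropWhile_sublist _) ht
    have hrest : ∀ z ∈ t.dropWhile (fun p => p.1 == rod), rod < z.1 := by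
      cases hdw : t.dropWhile (fun p => p.1 == rod) with
      | nil => intro z hz; simp at hz
      | cons y r' =>
        have hne : t.dropWhile (fun p => p.1 == rod) ≠ [] := by rw [hdw]; simp
        have hpy0 := List.head_dropWhile_not (fun p : Char × Char => p.1 == rod) hne
        have hh : (t.dropWhile (fun p => p.1 == rod)).head hne = y := by
          simp only [hdw, List.head_cons]
        rw [hh] at hpy0
        have hpy : y.1 ≠ rod := by simpa using hpy0
        have hyt : y ∈ t := (List.dropWhile_sublist _).mem (by rw [hdw]; exact List.mem_cons_self)
        have hy1 : rod < y.1 := lt_of_le_of_ne (h0 y hyt) (fun h => hpy h.symm)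
        intro z hz
        rcases List.mem_cons.mp hz with rfl | hz'
        · exact hy1
        · have hle : y.1 ≤ z.1 := by
            rw [hdw] at hrestpw
            exact (List.pairwise_cons.mp hrestpw).1 z hz'
          exact lt_of_lt_of_le hy1 hle
    have hrun : ∀ y ∈ t.takeWhile (fun p => p.1 == rod), (Prod.fst y) = rod := by
      intro y hy
      have := List.mem_takeWhile_imp hy
      simpa using this
    have hsplit : t.takeWhile (fun p => p.1 == rod) ++ t.dropWhile (fun p => p.1 == rod) = t :=
      List.takeWhile_append_dropWhile
    have hmemt : ∀ q : Char × Char, q ∈ t ↔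
        q ∈ t.takeWhile (fun p => p.1 == rod) ∨ q ∈ t.dropWhile (fun p => p.1 == rod) := by
      intro q
      rw [← List.mem_append, hsplit]
    have hmemL : ∀ q : Char × Char, q ∈ (rod, c) :: t ↔
        q = (rod, c) ∨ q ∈ t.takeWhile (fun p => p.1 == rod)
          ∨ q ∈ t.dropWhile (fun p => p.1 == rod) := by
      intro q
      rw [List.mem_cons, hmemt]
    have hseen : ∀ x : Char, ((rod, x) ∈ (rod, c) :: t) ↔
        x ∈ c :: (t.takeWhile (fun p => p.1 == rod)).map Prod.snd := by
      intro x
      rw [hmemL]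
      constructor
      · rintro (h | h | h)
        · injection h with h1 h2
          subst h2
          exact List.mem_cons_self
        · exact List.mem_cons_of_mem _ (List.mem_map.mpr ⟨(rod, x), h, rfl⟩)
        · exact absurd (hrest _ h) (by simp)
      · intro h
        rcases List.mem_cons.mp h with rfl | h'
        · exact Or.inl rfl
        · obtain ⟨q, hq, hq2⟩ := List.mem_map.mp h'
          refine Or.inr (Or.inl ?_)
          have hq1 := hrun q hq
          have heq : q = (rod, x) := by
            cases q
            simp only at hq1 hq2
            rw [hq1, hq2]
          rwa [heq] at hq
    have hrodnotin : rod ∉ (t.dropWhile (fun p => p.1 == rod)).map Prod.fst := by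
      intro h
      obtain ⟨z, hz, hz1⟩ := List.mem_map.mp h
      exact absurd (hrest z hz) (by rw [hz1]; simp)
    have hperm : (PySem.Set.ofList (((rod, c) :: t).map Prod.fst)).Perm
        (rod :: PySem.Set.ofList ((t.dropWhile (fun p => p.1 == rod)).map Prod.fst)) := by
      rw [List.perm_ext_iff_of_nodup (PySem.Set.nodup_ofList _)
        (List.nodup_cons.mpr ⟨fun h => hrodnotin ((PySem.Set.mem_ofList _ _).mp h),
          PySem.Set.nodup_ofList _⟩)]
      intro a
      rw [PySem.Set.mem_ofList, List.mem_cons, PySem.Set.mem_ofList]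
      constructor
      · intro h
        obtain ⟨q, hq, rfl⟩ := List.mem_map.mp h
        rcases List.mem_cons.mp hq with rfl | hq'
        · exact Or.inl rfl
        · rcases (hmemt q).mp hq' with h' | h'
          · exact Or.inl (hrun q h')
          · exact Or.inr (List.mem_map.mpr ⟨q, h', rfl⟩)
      · intro h
        rcases h with rfl | h'
        · exact List.mem_map.mpr ⟨(a, c), List.mem_cons_self, rfl⟩
        · obtain ⟨q, hq, rfl⟩ := List.mem_map.mp h'
          exact List.mem_map.mpr ⟨q, List.mem_cons_of_mem _ ((List.dropWhile_sublist _).mem hq), rfl⟩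
    have hpredrod : (decide (((rod : Char), 'B') ∈ (rod, c) :: t)
          && decide ((rod, 'G') ∈ (rod, c) :: t) && decide ((rod, 'R') ∈ (rod, c) :: t))
        = ((c :: (t.takeWhile (fun p => p.1 == rod)).map Prod.snd).contains 'B'
          && (c :: (t.takeWhile (fun p => p.1 == rod)).map Prod.snd).contains 'G'
          && (c :: (t.takeWhile (fun p => p.1 == rod)).map Prod.snd).contains 'R') := by
      rw [Bool.eq_iff_iff]
      simp only [Bool.and_eq_true, decide_eq_true_eq, List.contains_iff_mem, hseen]
    have hpredrest : ∀ r ∈ PySem.Set.ofList ((t.dropWhile (fun p => p.1 == rod)).map Prod.fst),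
        (decide ((r, 'B') ∈ (rod, c) :: t) && decide ((r, 'G') ∈ (rod, c) :: t)
          && decide ((r, 'R') ∈ (rod, c) :: t))
        = (decide ((r, 'B') ∈ t.dropWhile (fun p => p.1 == rod))
          && decide ((r, 'G') ∈ t.dropWhile (fun p => p.1 == rod))
          && decide ((r, 'R') ∈ t.dropWhile (fun p => p.1 == rod))) := by
      intro r hr
      obtain ⟨z, hz, hz1⟩ := List.mem_map.mp ((PySem.Set.mem_ofList _ _).mp hr)
      have hrne : rod ≠ r := by
        have := hrest z hz; rw [hz1] at this; exact ne_of_lt this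
      have hmm : ∀ x : Char, ((r, x) ∈ (rod, c) :: t) ↔
          (r, x) ∈ t.dropWhile (fun p => p.1 == rod) := by
        intro x
        rw [hmemL]
        constructor
        · rintro (h | h | h)
          · exact absurd (congrArg Prod.fst h) (by simpa using fun he => hrne he.symm)
          · exact absurd (hrun _ h) (fun he => hrne he.symm)
          · exact h
        · exact fun h => Or.inr (Or.inr h)
      rw [Bool.eq_iff_iff]
      simp only [Bool.and_eq_true, decide_eq_true_eq, hmm]
    have hcc : (PySem.Set.ofList ((t.dropWhile (fun p => p.1 == rod)).map Prod.fst)).countP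
          (fun r => decide ((r, 'B') ∈ (rod, c) :: t) && decide ((r, 'G') ∈ (rod, c) :: t)
            && decide ((r, 'R') ∈ (rod, c) :: t))
        = (PySem.Set.ofList ((t.dropWhile (fun p => p.1 == rod)).map Prod.fst)).countP
          (fun r => decide ((r, 'B') ∈ t.dropWhile (fun p => p.1 == rod))
            && decide ((r, 'G') ∈ t.dropWhile (fun p => p.1 == rod))
            && decide ((r, 'R') ∈ t.dropWhile (fun p => p.1 == rod))) :=
      List.countP_congr (fun x hx => by rw [hpredrest x hx])
    rw [pvScan]
    rw [ih hrestpw, List.Perm.countP_eq _ hperm, List.countP_cons, hcc, hpredrod]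
    push_cast
    ring

-- B computes pvCanon of the same pair list
lemma pvB_canon (rings : String) : countPoints_alt rings = pvCanon (pvPairsOf rings.toList) := by
  have h1 : countPoints_alt rings
      = pvScan (PySem.List.sorted ((pvPairsOf rings.toList).map (fun p => (p.2, p.1)))
          Prod.fst false) := by
    unfold countPoints_alt
    exact congrArg (fun x => pvScan (PySem.List.sorted x Prod.fst false))
      (pvPairs_map rings.toList)
  have hperm : (PySem.List.sorted ((pvPairsOf rings.toList).map (fun p => (p.2, p.1)))
        Prod.fst false).Perm ((pvPairsOf rings.toList).map (fun p => (p.2, p.1))) :=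
    PySem.List.sorted_perm _ _ _
  have hmemS : ∀ q : Char × Char,
      q ∈ PySem.List.sorted ((pvPairsOf rings.toList).map (fun p => (p.2, p.1))) Prod.fst false
        ↔ (q.2, q.1) ∈ pvPairsOf rings.toList := by
    intro q
    rw [hperm.mem_iff]
    constructor
    · intro h
      obtain ⟨p, hp, he⟩ := List.mem_map.mp h
      rw [← he]
      exact hp
    · intro h
      exact List.mem_map.mpr ⟨(q.2, q.1), h, rfl⟩
  rw [h1, pvScan_sorted _ (PySem.List.sorted_pairwise _ _), pvCanon]
  congr 1
  have hpred : ∀ r : Char,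
      (decide ((r, 'B') ∈ PySem.List.sorted ((pvPairsOf rings.toList).map (fun p => (p.2, p.1)))
          Prod.fst false)
        && decide ((r, 'G') ∈ PySem.List.sorted ((pvPairsOf rings.toList).map (fun p => (p.2, p.1)))
          Prod.fst false)
        && decide ((r, 'R') ∈ PySem.List.sorted ((pvPairsOf rings.toList).map (fun p => (p.2, p.1)))
          Prod.fst false))
      = (decide (('B', r) ∈ pvPairsOf rings.toList) && decide (('G', r) ∈ pvPairsOf rings.toList)
        && decide (('R', r) ∈ pvPairsOf rings.toList)) := by
    intro r
    rw [Bool.eq_iff_iff]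
    simp only [Bool.and_eq_true, decide_eq_true_eq, hmemS]
  rw [List.countP_congr (fun x _ => by rw [hpred x])]
  apply List.Perm.countP_eq
  rw [List.perm_ext_iff_of_nodup (PySem.Set.nodup_ofList _) (PySem.Set.nodup_ofList _)]
  intro a
  simp only [PySem.Set.mem_ofList, List.mem_map]
  constructor
  · intro h
    obtain ⟨q, hq, rfl⟩ := h
    exact ⟨(q.2, q.1), (hmemS q).mp hq, rfl⟩
  · intro h
    obtain ⟨p, hp, rfl⟩ := h
    exact ⟨(p.2, p.1), (hmemS (p.2, p.1)).mpr hp, rfl⟩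

-- ===== VERDICT (by name: the statement is the Claim_ definition above) =====
theorem countPoints_spec : Claim_equal_countPoints := by
  intro rings _
  show countPoints rings = countPoints_alt rings
  rw [pvA_canon, pvB_canon]
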